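-- pv_equiv track=rewrite | github.com/FUshi37/CouresProjects | Cross_Innovation_Practice/AlgorithmDesign/PCPSolver.py | pcp_solver
-- ===== SOURCE A (Python) =====
-- def pcp_solver(A, B):
--     from itertools import product
--
--     if len(A) != len(B):
--         return None
--
--     n = len(A)
--     for length in range(1, 11):  # 限制序列的最大长度为10
--         for indices in product(range(n), repeat=length):
--             concat_A = ''.join(A[i] for i in indices)
--             concat_B = ''.join(B[i] for i in indices)
--             if concat_A == concat_B:
--                 return [index + 1 for index in indices]
--
--     return None
-- ===== SOURCE B (Python) =====
-- def pcp_solver(A, B):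
--     if len(A) != len(B):
--         return None
--
--     n = len(A)
--
--     def dfs(depth, ca, cb):
--         # Invariant on entry: one of ca, cb is a prefix of the other.
--         if depth == 0:
--             return [] if ca == cb else None
--         for i in range(n):
--             ca2 = ca + A[i]
--             cb2 = cb + B[i]
--             if ca2.startswith(cb2) or cb2.startswith(ca2):
--                 r = dfs(depth - 1, ca2, cb2)
--                 if r is not None:
--                     return [i] + r
--         return None
--
--     for length in range(1, 11):  # same depth bound 10 as the brute force
--         r = dfs(length, "", "")
--         if r is not None:
--             return [i + 1 for i in r]
--     return None
-- ===== Notes on version B (the rewrite author's own statement) =====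
-- stated objective: faster
-- what changed: Replaced the exhaustive itertools.product enumeration of all n^length index tuples with an iterative-deepening DFS that extends the two concatenations incrementally and prunes any branch where neither concatenation is a prefix of the other, visiting candidates in the same order so the first solution found is identical; intended as faster: in a timing run A timed out at n=16 on inputs where B returned (no clean ratio could be measured).
import Mathlib
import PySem

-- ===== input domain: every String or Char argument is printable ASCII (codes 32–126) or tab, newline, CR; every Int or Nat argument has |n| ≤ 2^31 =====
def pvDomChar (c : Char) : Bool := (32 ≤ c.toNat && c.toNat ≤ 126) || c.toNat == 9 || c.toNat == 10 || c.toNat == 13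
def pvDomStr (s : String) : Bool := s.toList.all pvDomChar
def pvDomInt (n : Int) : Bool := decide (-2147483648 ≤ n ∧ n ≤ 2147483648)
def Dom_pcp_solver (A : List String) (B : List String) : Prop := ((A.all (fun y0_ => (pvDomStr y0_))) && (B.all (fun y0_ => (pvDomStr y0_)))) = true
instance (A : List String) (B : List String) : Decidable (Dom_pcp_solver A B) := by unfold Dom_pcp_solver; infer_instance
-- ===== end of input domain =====

-- B replaces A's exhaustive product enumeration by an iterative-deepening DFS with
-- prefix-mismatch pruning and incremental concatenation, visiting candidates in the
-- same order, so the first solution found is identical (intended as faster: in the timing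
-- run A timed out where B returned; no clean ratio was measurable).

-- ===== PORT A =====
-- String concatenation/equality is ported on List Char (String.toList), which is exact:
-- two Strings are equal iff their character lists are.

-- all index tuples of the given length over range n, in itertools.product order
-- (last position varies fastest = lexicographic)
def pvTuples (n : Nat) : Nat → List (List Nat)
  | 0 => [[]]
  | k + 1 => (List.range n).flatMap (fun i => (pvTuples n k).map (fun t => i :: t))

-- ''.join(X[i] for i in indices), on character lists
def pvCat (X : List (List Char)) (t : List Nat) : List Char :=
  t.flatMap (fun i => X.getD i [])

def pcp_solver (A : List String) (B : List String) : Option (List Int) :=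
  if A.length ≠ B.length then none
  else
    let n := A.length
    let As := A.map String.toList
    let Bs := B.map String.toList
    -- for length in range(1, 11): for indices in product(range(n), repeat=length): ...
    (List.range' 1 10).findSome? (fun len =>
      ((pvTuples n len).find? (fun t => decide (pvCat As t = pvCat Bs t))).map
        (fun t => t.map (fun i => (i : Int) + 1)))

-- ===== PORT B =====
-- depth-first search extending both concatenations one tile at a time; a branch is cut
-- as soon as neither concatenation is a prefix of the other
def pvDfs (As Bs : List (List Char)) (n : Nat) : Nat → List Char → List Char → Option (List Nat)
  | 0, ca, cb => if ca = cb then some [] else none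
  | k + 1, ca, cb =>
    (List.range n).findSome? (fun i =>
      if (ca ++ As.getD i []).isPrefixOf (cb ++ Bs.getD i [])
          || (cb ++ Bs.getD i []).isPrefixOf (ca ++ As.getD i []) then
        (pvDfs As Bs n k (ca ++ As.getD i []) (cb ++ Bs.getD i [])).map (fun r => i :: r)
      else none)

def pcp_solver_alt (A : List String) (B : List String) : Option (List Int) :=
  if A.length ≠ B.length then none
  else
    let n := A.length
    let As := A.map String.toList
    let Bs := B.map String.toList
    (List.range' 1 10).findSome? (fun len =>
      (pvDfs As Bs n len [] []).map (fun r => r.map (fun i => (i : Int) + 1)))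

-- ===== PRECONDITION & SPEC =====
def Spec_pcp_solver (A : List String) (B : List String) (out : Option (List Int)) : Prop := out = pcp_solver_alt A B
instance (A : List String) (B : List String) (out : Option (List Int)) : Decidable (Spec_pcp_solver A B out) := by unfold Spec_pcp_solver; infer_instance

-- ===== CLAIM (what is proved, stated in full; the proofs are below) =====
def Claim_equal_pcp_solver : Prop := ∀ (A : List String) (B : List String), Dom_pcp_solver A B → Spec_pcp_solver A B (pcp_solver A B)

-- ===== LEMMAS AND PROOFS =====

lemma pv_find?_flatMap {α β : Type} (l : List α) (f : α → List β) (p : β → Bool) :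
    (l.flatMap f).find? p = l.findSome? (fun a => (f a).find? p) := by
  induction l with
  | nil => rfl
  | cons a l ih =>
    rw [List.flatMap_cons, List.find?_append, List.findSome?_cons, ih]
    cases h : (f a).find? p <;> simp [Option.or]

-- ca' ++ x = cb' ++ y forces ca', cb' to be prefix-comparable
lemma pv_findSome?_congr {α β : Type} (l : List α) (f g : α → Option β)
    (h : ∀ a ∈ l, f a = g a) : l.findSome? f = l.findSome? g := by
  induction l with
  | nil => rfl
  | cons a l ih =>
    rw [List.findSome?_cons, List.findSome?_cons, h a (List.mem_cons_self),
      ih (fun x hx => h x (List.mem_cons_of_mem a hx))]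

lemma pv_comparable {ca' cb' x y : List Char} (h : ca' ++ x = cb' ++ y) :
    ca' <+: cb' ∨ cb' <+: ca' := by
  have h1 : ca' <+: cb' ++ y := h ▸ List.prefix_append ca' x
  exact List.prefix_or_prefix_of_prefix h1 (List.prefix_append cb' y)

-- the pruned DFS computes exactly the first matching tuple of the brute force
lemma pv_dfs_eq (As Bs : List (List Char)) (n : Nat) :
    ∀ (k : Nat) (ca cb : List Char),
      pvDfs As Bs n k ca cb =
        (pvTuples n k).find? (fun t => decide (ca ++ pvCat As t = cb ++ pvCat Bs t)) := by
  intro k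
  induction k with
  | zero =>
    intro ca cb
    simp [pvDfs, pvTuples, pvCat]
  | succ k ih =>
    intro ca cb
    rw [pvDfs, pvTuples, pv_find?_flatMap]
    apply pv_findSome?_congr
    intro i _
    rw [List.find?_map]
    have hpred : ((fun t => decide (ca ++ pvCat As t = cb ++ pvCat Bs t)) ∘ (fun t => i :: t))
        = fun t => decide ((ca ++ As.getD i []) ++ pvCat As t = (cb ++ Bs.getD i []) ++ pvCat Bs t) := by
      funext t
      simp [Function.comp, pvCat, List.flatMap_cons, List.append_assoc]
    rw [hpred]
    split_ifs with hp
    · rw [ih]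
    · have hnone : (pvTuples n k).find?
          (fun t => decide (ca ++ As.getD i [] ++ pvCat As t = cb ++ Bs.getD i [] ++ pvCat Bs t)) = none := by
        rw [List.find?_eq_none]
        intro t _
        simp only [decide_eq_true_eq]
        intro heq
        simp only [Bool.or_eq_true, not_or, List.isPrefixOf_iff_prefix] at hp
        rcases pv_comparable heq with hc | hc
        · exact hp.1 hc
        · exact hp.2 hc
      rw [hnone]
      rfl

-- ===== VERDICT (by name: the statement is the Claim_ definition above) =====
theorem pcp_solver_spec : Claim_equal_pcp_solver := by
  intro A B _
  unfold Spec_pcp_solver pcp_solver pcp_solver_alt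
  by_cases h : A.length ≠ B.length
  · simp [h]
  · simp only [h, if_neg, not_false_iff]
    apply pv_findSome?_congr
    intro len _
    rw [pv_dfs_eq]
    simp only [List.nil_append]
    rfl
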